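-- pv_equiv track=rewrite | github.com/emdros/emdros | tests/bptqa2h.py | postprocess_const_char
-- ===== SOURCE A (Python) =====
-- def postprocess_const_char(instr):
--     arr = instr.strip().split("\n")
--     tmp_arr = []
--     tmp_arr.append([])
--
--     count = 0
--     for line in arr:
--         tmp_arr[-1].append(line + "\n")
--         count += 1
--         if count == 800:
--             tmp_arr.append([])
--             count = 0
--
--     # Chop off the last one if it is empty
--     if len(tmp_arr[-1]) == 0:
--         tmp_arr.pop()
--
--     result_arr = []
--     for inner_arr in tmp_arr:
--         result_arr.append("std::string(%s)" % "\n".join(["\"%s\"" % x.replace(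
--             "\\", "\\\\").replace("\"", "\\\"").replace("\n", "\\n") for x in inner_arr]))
--     return "+\n".join(result_arr) + "\n"
-- ===== SOURCE B (Python) =====
-- def postprocess_const_char(instr):
--     def fmt(line):
--         return '"%s\\n"' % line.replace("\\", "\\\\").replace('"', '\\"')
--     lines = instr.strip().split("\n")
--     parts = []
--     while lines:
--         parts.append("std::string(%s)" % "\n".join(fmt(l) for l in lines[:800]))
--         lines = lines[800:]
--     return "+\n".join(parts) + "\n"
-- ===== Notes on version B (the rewrite author's own statement) =====
-- stated objective: simpler
-- what changed: Replaces the per-line counter, the mutable list-of-lists with append-to-last, and the trailing-empty-chunk pop by direct slicing into 800-line groups (take/drop), and escapes each line once without appending and then re-escaping a newline.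
import Mathlib
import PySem

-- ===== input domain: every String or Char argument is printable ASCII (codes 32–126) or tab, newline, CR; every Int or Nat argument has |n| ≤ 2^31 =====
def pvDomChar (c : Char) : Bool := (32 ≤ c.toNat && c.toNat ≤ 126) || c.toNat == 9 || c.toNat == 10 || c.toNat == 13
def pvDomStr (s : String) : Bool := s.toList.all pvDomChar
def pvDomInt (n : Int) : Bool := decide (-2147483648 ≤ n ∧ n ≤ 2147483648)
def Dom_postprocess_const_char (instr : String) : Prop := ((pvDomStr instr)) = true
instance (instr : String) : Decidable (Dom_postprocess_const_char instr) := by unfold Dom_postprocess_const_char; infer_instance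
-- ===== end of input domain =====

-- B replaces A's per-line counter, mutable list-of-lists and trailing-empty-chunk pop by direct
-- take/drop slicing into 800-line groups, escaping each line once (objective: simpler).

-- ===== PORT A =====
-- '"%s"' % x.replace("\\","\\\\").replace('"','\\"').replace("\n","\\n")
def pvEscA (x : String) : String :=
  "\"" ++ PySem.Str.replace (PySem.Str.replace (PySem.Str.replace x "\\" "\\\\") "\"" "\\\"") "\n" "\\n" ++ "\""

-- tmp_arr[-1].append(...) : modify the last element of the list of lists
def pvModifyLast (f : List String → List String) : List (List String) → List (List String)
  | [] => []
  | [x] => [f x]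
  | x :: y :: xs => x :: pvModifyLast f (y :: xs)

-- the 'for line in arr' loop, carrying (tmp_arr, count)
def pvALoop : List String → List (List String) → Nat → List (List String) × Nat
  | [], tmp, count => (tmp, count)
  | line :: rest, tmp, count =>
      if count + 1 = 800 then pvALoop rest (pvModifyLast (fun l => l ++ [line ++ "\n"]) tmp ++ [[]]) 0
      else pvALoop rest (pvModifyLast (fun l => l ++ [line ++ "\n"]) tmp) (count + 1)

def postprocess_const_char (instr : String) : String :=
  let arr := (PySem.Str.split? (PySem.Str.strip instr) "\n").getD []
  let tmp0 := (pvALoop arr [[]] 0).1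
  -- 'if len(tmp_arr[-1]) == 0: tmp_arr.pop()'  (tmp0 is always nonempty here)
  let tmp_arr := if tmp0.getLast? = some [] then tmp0.dropLast else tmp0
  let result_arr := tmp_arr.map (fun inner =>
    "std::string(" ++ PySem.Str.join "\n" (List.map pvEscA inner) ++ ")")
  PySem.Str.join "+\n" result_arr ++ "\n"

-- ===== PORT B =====
-- '"%s\\n"' % line.replace("\\","\\\\").replace('"','\\"')
def pvEscB (line : String) : String :=
  "\"" ++ PySem.Str.replace (PySem.Str.replace line "\\" "\\\\") "\"" "\\\"" ++ "\\n\""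

-- the 'while lines:' loop: format lines[:800], continue with lines[800:]
def pvBParts (lines : List String) : List String :=
  if h : lines = [] then []
  else
    ("std::string(" ++ PySem.Str.join "\n" (List.map pvEscB (PySem.List.slice lines none (some 800))) ++ ")")
      :: pvBParts (PySem.List.slice lines (some 800) none)
  termination_by lines.length
  decreasing_by
    rw [PySem.List.slice_from lines (by norm_num : (0:Int) ≤ 800)]
    rw [List.length_drop]
    have h0 : lines.length ≠ 0 := fun hz => h (List.eq_nil_of_length_eq_zero hz)
    omega

def postprocess_const_char_alt (instr : String) : String :=
  let lines := (PySem.Str.split? (PySem.Str.strip instr) "\n").getD []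
  PySem.Str.join "+\n" (pvBParts lines) ++ "\n"

-- ===== PRECONDITION & SPEC =====
def Spec_postprocess_const_char (instr : String) (out : String) : Prop := out = postprocess_const_char_alt instr
instance (instr : String) (out : String) : Decidable (Spec_postprocess_const_char instr out) := by unfold Spec_postprocess_const_char; infer_instance

-- ===== CLAIM (what is proved, stated in full; the proofs are below) =====
def Claim_equal_postprocess_const_char : Prop := ∀ (instr : String), Dom_postprocess_const_char instr → Spec_postprocess_const_char instr (postprocess_const_char instr)

-- ===== LEMMAS AND PROOFS =====

-- substitution of a single character
def pvSubst (c : Char) (n : List Char) (d : Char) : List Char := if d = c then n else [d]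

lemma replace_go_single (c : Char) (n : List Char) :
    ∀ (fuel : Nat) (l acc : List Char), l.length ≤ fuel →
      PySem.Chars.replace.go [c] n fuel l acc = acc.reverse ++ l.flatMap (pvSubst c n) := by
  intro fuel
  induction fuel with
  | zero =>
    intro l acc h
    have : l = [] := by cases l with | nil => rfl | cons a t => simp at h
    subst this
    simp [PySem.Chars.replace.go]
  | succ m ih =>
    intro l acc h
    cases l with
    | nil => simp [PySem.Chars.replace.go]
    | cons d t =>
      by_cases hd : d = c
      · subst hd
        have hpre : List.isPrefixOf [d] (d :: t) = true := by simp [List.isPrefixOf]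
        rw [PySem.Chars.replace.go, if_pos hpre]
        simp only [List.length_cons, List.length_nil, List.drop_succ_cons, List.drop_zero]
        rw [ih t (n.reverse ++ acc) (by simp at h; omega)]
        simp [pvSubst]
      · have hpre : List.isPrefixOf [c] (d :: t) = false := by
          simp [List.isPrefixOf]; exact fun hcd => absurd hcd.symm hd
        rw [PySem.Chars.replace.go, if_neg (by simp [hpre])]
        rw [ih t (d :: acc) (by simp at h; omega)]
        simp [pvSubst, hd]

lemma replace_single (s : List Char) (c : Char) (n : List Char) :
    PySem.Chars.replace s [c] n = s.flatMap (pvSubst c n) := by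
  rw [PySem.Chars.replace]
  rw [if_neg (by simp)]
  exact replace_go_single c n s.length s [] le_rfl

lemma toList_replace_single (s o n : String) (c : Char) (ho : o.toList = [c]) :
    (PySem.Str.replace s o n).toList = s.toList.flatMap (pvSubst c n.toList) := by
  rw [PySem.Str.toList_replace, ho, replace_single]

lemma flatMap_subst_id (c : Char) (n X : List Char) (h : c ∉ X) :
    X.flatMap (pvSubst c n) = X := by
  induction X with
  | nil => rfl
  | cons d t ih =>
    simp only [List.mem_cons, not_or] at h
    simp only [List.flatMap_cons, pvSubst]
    rw [if_neg (fun hdc => h.1 hdc.symm), ih h.2]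
    rfl

lemma not_mem_flatMap_subst (c c' : Char) (n X : List Char)
    (hX : c' ∉ X) (hn : c' ∉ n) : c' ∉ X.flatMap (pvSubst c n) := by
  intro hmem
  rw [List.mem_flatMap] at hmem
  obtain ⟨d, hd, hin⟩ := hmem
  by_cases hdc : d = c
  · rw [pvSubst, if_pos hdc] at hin; exact hn hin
  · rw [pvSubst, if_neg hdc] at hin
    simp at hin
    exact hX (hin ▸ hd)

lemma esc_eq (l : String) (h : '\n' ∉ l.toList) : pvEscA (l ++ "\n") = pvEscB l := by
  rw [← String.toList_inj]
  have hbs : ("\\" : String).toList = ['\\'] := by decide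
  have hq : ("\"" : String).toList = ['"'] := by decide
  have hnl : ("\n" : String).toList = ['\n'] := by decide
  have hX2 : '\n' ∉ (l.toList.flatMap (pvSubst '\\' ("\\\\" : String).toList)).flatMap
      (pvSubst '"' ("\\\"" : String).toList) := by
    apply not_mem_flatMap_subst
    · exact not_mem_flatMap_subst _ _ _ _ h (by decide)
    · decide
  simp only [pvEscA, pvEscB, String.toList_append,
    toList_replace_single _ _ _ _ hbs, toList_replace_single _ _ _ _ hq,
    toList_replace_single _ _ _ _ hnl]
  rw [hnl, List.flatMap_append, List.flatMap_append]
  have h1 : (['\n'] : List Char).flatMap (pvSubst '\\' ("\\\\" : String).toList) = ['\n'] := by decide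
  have h2 : (['\n'] : List Char).flatMap (pvSubst '"' ("\\\"" : String).toList) = ['\n'] := by decide
  rw [h1, h2, List.flatMap_append, flatMap_subst_id _ _ _ hX2]
  have h3 : (['\n'] : List Char).flatMap (pvSubst '\n' ("\\n" : String).toList) = ['\\', 'n'] := by decide
  rw [h3]
  have h4 : ("\\n\"" : String).toList = ['\\', 'n', '"'] := by decide
  rw [h4, hq]
  simp

-- no piece returned by split("\n") contains '\n'
lemma splitOn_go_no_nl (c : Char) :
    ∀ (fuel : Nat) (l cur : List Char) (acc : List (List Char)),
      l.length < fuel → c ∉ cur → (∀ p ∈ acc, c ∉ p) →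
      ∀ p ∈ PySem.Chars.splitOn.go [c] fuel l cur acc, c ∉ p := by
  intro fuel
  induction fuel with
  | zero => intro l cur acc h; omega
  | succ m ih =>
    intro l cur acc hlen hcur hacc p hp
    cases l with
    | nil =>
      rw [PySem.Chars.splitOn.go] at hp
      · simp at hp
        rcases hp with hp | hp
        · exact hacc p hp
        · subst hp; simpa using hcur
      all_goals omega
    | cons d t =>
      by_cases hd : d = c
      · subst hd
        have hpre : List.isPrefixOf [d] (d :: t) = true := by simp [List.isPrefixOf]
        rw [PySem.Chars.splitOn.go, if_pos hpre] at hp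
        simp only [List.length_cons, List.length_nil, List.drop_succ_cons, List.drop_zero] at hp
        refine ih t [] (cur.reverse :: acc) (by simp at hlen; omega) (by simp)
          ?_ p hp
        intro q hq
        rcases List.mem_cons.mp hq with hq | hq
        · subst hq; simpa using hcur
        · exact hacc q hq
      · have hpre : List.isPrefixOf [c] (d :: t) = false := by
          simp [List.isPrefixOf]; exact fun hcd => absurd hcd.symm hd
        rw [PySem.Chars.splitOn.go, if_neg (by simp [hpre])] at hp
        refine ih t (d :: cur) acc (by simp at hlen; omega) ?_ hacc p hp
        intro hmem
        rcases List.mem_cons.mp hmem with hmem | hmem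
        · exact hd hmem.symm
        · exact hcur hmem

lemma split_no_nl (s : String) :
    ∀ l ∈ (PySem.Str.split? s "\n").getD [], '\n' ∉ l.toList := by
  have hmap := PySem.Str.split?_map s "\n"
  have hnl : ("\n" : String).toList = ['\n'] := by decide
  rw [hnl, PySem.Chars.split?, if_neg (by simp)] at hmap
  cases hsp : PySem.Str.split? s "\n" with
  | none => rw [hsp] at hmap; simp at hmap
  | some parts =>
    rw [hsp] at hmap
    simp only [Option.map_some] at hmap
    intro l hl
    simp only [Option.getD_some] at hl
    have hmem : l.toList ∈ PySem.Chars.splitOn s.toList ['\n'] := by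
      rw [← Option.some_inj.mp hmap]
      exact List.mem_map_of_mem hl
    rw [PySem.Chars.splitOn] at hmem
    exact splitOn_go_no_nl '\n' (s.toList.length + 1) s.toList [] [] (by omega)
      (by simp) (by simp) l.toList hmem

-- ---- A-side characterisation ----

def pvF (l : String) : String := l ++ "\n"

def pvChunksAux (cur : List String) : List String → List (List String)
  | [] => [cur]
  | l :: rest =>
    if cur.length + 1 = 800 then (cur ++ [pvF l]) :: pvChunksAux [] rest
    else pvChunksAux (cur ++ [pvF l]) rest

lemma pvModifyLast_append (f : List String → List String) (done : List (List String))
    (cur : List String) : pvModifyLast f (done ++ [cur]) = done ++ [f cur] := by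
  induction done with
  | nil => rfl
  | cons a done' ih =>
    cases done' with
    | nil => rfl
    | cons b rest =>
      show pvModifyLast f (a :: ((b :: rest) ++ [cur])) = a :: ((b :: rest) ++ [f cur])
      rw [show ((b :: rest) ++ [cur]) = b :: (rest ++ [cur]) from rfl, pvModifyLast]
      rw [show (b :: (rest ++ [cur])) = (b :: rest) ++ [cur] from rfl, ih]

lemma pvALoop_spec : ∀ (lines : List String) (done : List (List String)) (cur : List String),
    (pvALoop lines (done ++ [cur]) cur.length).1 = done ++ pvChunksAux cur lines := by
  intro lines
  induction lines with
  | nil => intro done cur; simp [pvALoop, pvChunksAux]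
  | cons line rest ih =>
    intro done cur
    rw [pvALoop]
    simp only [pvModifyLast_append]
    by_cases h : cur.length + 1 = 800
    · rw [if_pos h]
      have h0 : (0 : Nat) = ([] : List String).length := rfl
      rw [h0, show (done ++ [cur ++ [line ++ "\n"]]) ++ [[]] =
            (done ++ [cur ++ [line ++ "\n"]]) ++ [([] : List String)] from rfl,
          ih (done ++ [cur ++ [line ++ "\n"]]) []]
      rw [pvChunksAux, if_pos h]
      simp [pvF]
    · rw [if_neg h]
      have hlen : cur.length + 1 = (cur ++ [line ++ "\n"]).length := by simp
      rw [hlen, ih done (cur ++ [line ++ "\n"])]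
      rw [pvChunksAux, if_neg h]
      rfl

def pvPopE (xs : List (List String)) : List (List String) :=
  if xs.getLast? = some [] then xs.dropLast else xs

def pvChunks (lines : List String) : List (List String) :=
  if h : lines = [] then []
  else (lines.take 800).map pvF :: pvChunks (lines.drop 800)
  termination_by lines.length
  decreasing_by
    rw [List.length_drop]
    have h0 : lines.length ≠ 0 := fun hz => h (List.eq_nil_of_length_eq_zero hz)
    omega

def pvChunksFrom (cur : List String) (lines : List String) : List (List String) :=
  if cur = [] ∧ lines = [] then []
  else (cur ++ (lines.take (800 - cur.length)).map pvF) :: pvChunks (lines.drop (800 - cur.length))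

lemma pvChunksFrom_nil (lines : List String) : pvChunksFrom [] lines = pvChunks lines := by
  rw [pvChunksFrom]
  by_cases h : lines = []
  · rw [if_pos (by simp [h]), h, pvChunks.eq_def]
    simp
  · rw [if_neg (by simp [h])]
    conv_rhs => rw [pvChunks.eq_def]
    rw [dif_neg h]
    simp

lemma pvChunksAux_ne_nil (cur : List String) (lines : List String) :
    pvChunksAux cur lines ≠ [] := by
  induction lines generalizing cur with
  | nil => simp [pvChunksAux]
  | cons l rest ih =>
    rw [pvChunksAux]
    by_cases h : cur.length + 1 = 800
    · simp [h]
    · rw [if_neg h]; exact ih _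

lemma pvPopE_cons (x : List String) (xs : List (List String)) (h : xs ≠ []) :
    pvPopE (x :: xs) = x :: pvPopE xs := by
  cases xs with
  | nil => exact absurd rfl h
  | cons b t =>
    unfold pvPopE
    rw [List.getLast?_cons_cons, List.dropLast_cons₂]
    split_ifs <;> rfl

lemma popE_chunksAux : ∀ (lines : List String) (cur : List String), cur.length < 800 →
    pvPopE (pvChunksAux cur lines) = pvChunksFrom cur lines := by
  intro lines
  induction lines with
  | nil =>
    intro cur _
    rw [pvChunksAux, pvChunksFrom]
    by_cases h : cur = []
    · simp [h, pvPopE]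
    · rw [if_neg (by simp [h])]
      unfold pvPopE
      rw [show ([cur] : List (List String)).getLast? = some cur from rfl]
      rw [if_neg (by simp [h])]
      rw [pvChunks.eq_def]
      simp
  | cons l rest ih =>
    intro cur hcur
    rw [pvChunksAux]
    by_cases h : cur.length + 1 = 800
    · rw [if_pos h, pvPopE_cons _ _ (pvChunksAux_ne_nil _ _), ih [] (by norm_num),
          pvChunksFrom_nil]
      rw [pvChunksFrom, if_neg (by simp)]
      have h799 : cur.length = 799 := by omega
      rw [h799]
      norm_num
    · rw [if_neg h, ih (cur ++ [pvF l]) (by simp; omega)]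
      rw [pvChunksFrom, pvChunksFrom]
      rw [if_neg (by simp), if_neg (by simp)]
      have harith : 800 - cur.length = (800 - (cur.length + 1)) + 1 := by omega
      rw [harith]
      rw [List.take_succ_cons, List.drop_succ_cons]
      simp

-- ---- B-side characterisation ----

lemma pvBParts_eq_chunks : ∀ (n : Nat) (lines : List String), lines.length ≤ n →
    (∀ l ∈ lines, '\n' ∉ l.toList) →
    pvBParts lines = (pvChunks lines).map (fun inner =>
      "std::string(" ++ PySem.Str.join "\n" (List.map pvEscA inner) ++ ")") := by
  intro n
  induction n with
  | zero =>
    intro lines h _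
    have : lines = [] := by cases lines with | nil => rfl | cons a t => simp at h
    subst this
    rw [pvBParts.eq_def, pvChunks.eq_def]
    simp
  | succ m ih =>
    intro lines hlen hnl
    rw [pvBParts.eq_def]
    conv_rhs => rw [pvChunks.eq_def]
    by_cases h : lines = []
    · simp [h]
    · rw [dif_neg h, dif_neg h]
      have htake : PySem.List.slice lines none (some 800) = lines.take 800 := by
        rw [PySem.List.slice_to lines (by norm_num : (0:Int) ≤ 800)]
        rfl
      have hdrop : PySem.List.slice lines (some 800) none = lines.drop 800 := by
        rw [PySem.List.slice_from lines (by norm_num : (0:Int) ≤ 800)]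
        rfl
      rw [htake, hdrop, List.map_cons]
      have hhead : List.map pvEscA (List.map pvF (lines.take 800)) =
          List.map pvEscB (lines.take 800) := by
        rw [List.map_map]
        apply List.map_congr_left
        intro l hl
        simp only [Function.comp, pvF]
        exact esc_eq l (hnl l (List.mem_of_mem_take hl))
      rw [hhead]
      have hlen' : (lines.drop 800).length ≤ m := by
        rw [List.length_drop]
        have : lines.length ≠ 0 := by
          intro h0; exact h (List.eq_nil_of_length_eq_zero h0)
        omega
      rw [ih (lines.drop 800) hlen' (fun l hl => hnl l (List.mem_of_mem_drop hl))]

-- ===== VERDICT (by name: the statement is the Claim_ definition above) =====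
theorem postprocess_const_char_spec : Claim_equal_postprocess_const_char := by
  intro instr _
  unfold Spec_postprocess_const_char postprocess_const_char postprocess_const_char_alt
  have key : ∀ (arr : List String), (∀ l ∈ arr, '\n' ∉ l.toList) →
      PySem.Str.join "+\n" ((if (pvALoop arr [[]] 0).1.getLast? = some []
          then (pvALoop arr [[]] 0).1.dropLast else (pvALoop arr [[]] 0).1).map
          (fun inner => "std::string(" ++ PySem.Str.join "\n" (List.map pvEscA inner) ++ ")")) ++ "\n"
        = PySem.Str.join "+\n" (pvBParts arr) ++ "\n" := by
    intro arr hnl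
    have h1 : (pvALoop arr [[]] 0).1 = pvChunksAux [] arr := by
      have h := pvALoop_spec arr [] []
      simpa using h
    rw [h1]
    simp only [show ∀ X : List (List String),
        (if X.getLast? = some [] then X.dropLast else X) = pvPopE X from fun _ => rfl]
    rw [popE_chunksAux arr [] (by norm_num), pvChunksFrom_nil,
        pvBParts_eq_chunks arr.length arr le_rfl hnl]
  exact key _ (split_no_nl _)
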